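-- pv_equiv track=rewrite | github.com/armaninspace/data_camp_exp | src/course_pipeline/questions/ledger/normalize.py | select_question_family
-- ===== SOURCE A (Python) =====
-- QUESTION_TYPE_MAP = {
--     "definition": "definition",
--     "purpose": "purpose",
--     "orientation": "purpose",
--     "comparison": "comparison",
--     "procedure": "procedure",
--     "when_to_use": "procedure",
--     "misconception": "misconception",
--     "diagnostic": "diagnostic",
--     "interpretation": "diagnostic",
--     "transfer": "application",
-- }
--
-- FAMILY_PRIORITY = ["entry", "bridge", "procedural", "friction", "diagnostic", "transfer"]
--
-- def normalize_question_type(question_type: str) -> str: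
--     return QUESTION_TYPE_MAP.get(question_type, "application")
--
-- def select_question_family(family_tags: list[str], question_type: str) -> str:
--     if family_tags:
--         for family in FAMILY_PRIORITY:
--             if family in family_tags:
--                 return family
--     mapped = normalize_question_type(question_type)
--     if mapped == "definition" or mapped == "purpose":
--         return "entry"
--     if mapped == "comparison":
--         return "bridge"
--     if mapped == "procedure":
--         return "procedural"
--     if mapped == "misconception":
--         return "friction"
--     if mapped == "diagnostic":
--         return "diagnostic"
--     return "transfer"
-- ===== SOURCE B (Python) =====
-- _RANK = {"entry": 0, "bridge": 1, "procedural": 2, "friction": 3,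
--          "diagnostic": 4, "transfer": 5}
--
-- _TYPE_FAMILY = {
--     "definition": "entry",
--     "purpose": "entry",
--     "orientation": "entry",
--     "comparison": "bridge",
--     "procedure": "procedural",
--     "when_to_use": "procedural",
--     "misconception": "friction",
--     "diagnostic": "diagnostic",
--     "interpretation": "diagnostic",
--     "transfer": "transfer",
-- }
--
-- def select_question_family(family_tags, question_type):
--     # one pass over the tags, keeping the (rank, family) with the smallest rank
--     best = None
--     for tag in family_tags:
--         r = _RANK.get(tag)
--         if r is not None and (best is None or r < best[0]):
--             best = (r, tag)
--     if best is not None: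
--         return best[1]
--     return _TYPE_FAMILY.get(question_type, "transfer")
-- ===== Notes on version B (the rewrite author's own statement) =====
-- stated objective: simpler
-- what changed: Replaces the scan over the priority list (with membership tests into the tags) by a single pass over the tags keeping the minimum-rank family via a rank dict, and collapses the two-stage type map + if/elif chain into one direct type->family dict with default 'transfer'.
import Mathlib
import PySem

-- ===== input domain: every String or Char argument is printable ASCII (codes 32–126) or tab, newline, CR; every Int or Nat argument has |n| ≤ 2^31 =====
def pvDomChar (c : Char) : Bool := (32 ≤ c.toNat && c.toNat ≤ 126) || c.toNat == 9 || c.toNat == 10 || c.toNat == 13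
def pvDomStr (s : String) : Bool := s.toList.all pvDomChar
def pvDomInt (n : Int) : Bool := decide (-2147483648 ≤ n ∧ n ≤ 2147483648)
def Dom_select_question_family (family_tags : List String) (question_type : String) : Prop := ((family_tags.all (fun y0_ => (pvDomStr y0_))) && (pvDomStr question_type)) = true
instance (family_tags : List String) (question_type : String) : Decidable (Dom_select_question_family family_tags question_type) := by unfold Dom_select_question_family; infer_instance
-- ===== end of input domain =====

-- B replaces A's priority-list scan with one pass over the tags keeping the minimum-rank family,
-- and collapses the two-stage type map + if/elif chain into one direct lookup (objective: simpler).


-- ===== PORT A =====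
def pvQUESTION_TYPE_MAP : PySem.Dict String String := PySem.Dict.ofList
  [("definition", "definition"), ("purpose", "purpose"), ("orientation", "purpose"),
   ("comparison", "comparison"), ("procedure", "procedure"), ("when_to_use", "procedure"),
   ("misconception", "misconception"), ("diagnostic", "diagnostic"),
   ("interpretation", "diagnostic"), ("transfer", "application")]

def pvFAMILY_PRIORITY : List String :=
  ["entry", "bridge", "procedural", "friction", "diagnostic", "transfer"]

def normalize_question_type (question_type : String) : String :=
  pvQUESTION_TYPE_MAP.getD question_type "application"

-- the 'for family in FAMILY_PRIORITY: if family in family_tags: return family' loop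
def pvScanA (pri : List String) (family_tags : List String) : Option String :=
  match pri with
  | [] => none
  | f :: rest => if family_tags.contains f then some f else pvScanA rest family_tags

def select_question_family (family_tags : List String) (question_type : String) : String :=
  match (if family_tags.isEmpty then none else pvScanA pvFAMILY_PRIORITY family_tags) with
  | some f => f
  | none =>
    let mapped := normalize_question_type question_type
    if mapped = "definition" ∨ mapped = "purpose" then "entry"
    else if mapped = "comparison" then "bridge"
    else if mapped = "procedure" then "procedural"
    else if mapped = "misconception" then "friction"
    else if mapped = "diagnostic" then "diagnostic"
    else "transfer"

-- ===== PORT B =====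
def pvRANK : PySem.Dict String Int := PySem.Dict.ofList
  [("entry", 0), ("bridge", 1), ("procedural", 2), ("friction", 3),
   ("diagnostic", 4), ("transfer", 5)]

def pvTYPE_FAMILY : PySem.Dict String String := PySem.Dict.ofList
  [("definition", "entry"), ("purpose", "entry"), ("orientation", "entry"),
   ("comparison", "bridge"), ("procedure", "procedural"), ("when_to_use", "procedural"),
   ("misconception", "friction"), ("diagnostic", "diagnostic"),
   ("interpretation", "diagnostic"), ("transfer", "transfer")]

-- one iteration of B's loop: keep the (rank, family) pair with the smallest rank
def pvStepB (best : Option (Int × String)) (tag : String) : Option (Int × String) :=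
  match pvRANK.get? tag with
  | none => best
  | some r =>
    match best with
    | none => some (r, tag)
    | some (br, bf) => if r < br then some (r, tag) else some (br, bf)

def select_question_family_alt (family_tags : List String) (question_type : String) : String :=
  match family_tags.foldl pvStepB none with
  | some (_, f) => f
  | none => pvTYPE_FAMILY.getD question_type "transfer"

-- ===== PRECONDITION & SPEC =====
def Spec_select_question_family (family_tags : List String) (question_type : String) (out : String) : Prop := out = select_question_family_alt family_tags question_type
instance (family_tags : List String) (question_type : String) (out : String) : Decidable (Spec_select_question_family family_tags question_type out) := by unfold Spec_select_question_family; infer_instance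

-- ===== CLAIM (what is proved, stated in full; the proofs are below) =====
def Claim_equal_select_question_family : Prop := ∀ (family_tags : List String) (question_type : String), Dom_select_question_family family_tags question_type → Spec_select_question_family family_tags question_type (select_question_family family_tags question_type)

-- ===== LEMMAS AND PROOFS =====

lemma rank_char (t : String) : pvRANK.get? t =
    if "entry" = t then some 0 else if "bridge" = t then some 1
    else if "procedural" = t then some 2 else if "friction" = t then some 3
    else if "diagnostic" = t then some 4 else if "transfer" = t then some 5 else none := by
  rw [(by decide : pvRANK = PySem.Dict.mk
    [("entry", 0), ("bridge", 1), ("procedural", 2), ("friction", 3),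
     ("diagnostic", 4), ("transfer", 5)])]
  simp only [PySem.Dict.get?, List.find?]
  split_ifs with h1 h2 h3 h4 h5 h6
  · subst h1; decide
  · subst h2; decide
  · subst h3; decide
  · subst h4; decide
  · subst h5; decide
  · subst h6; decide
  · rw [beq_eq_false_iff_ne.mpr h1, beq_eq_false_iff_ne.mpr h2, beq_eq_false_iff_ne.mpr h3,
       beq_eq_false_iff_ne.mpr h4, beq_eq_false_iff_ne.mpr h5, beq_eq_false_iff_ne.mpr h6]
    rfl

-- left-biased min by rank; pvStepB best tag = pvMin best (pvStepB none tag)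
def pvMin (a b : Option (Int × String)) : Option (Int × String) :=
  match b with
  | none => a
  | some (r, f) =>
    match a with
    | none => some (r, f)
    | some (ar, af) => if r < ar then some (r, f) else some (ar, af)

lemma pvMin_none_left (b : Option (Int × String)) : pvMin none b = b := by
  rcases b with _ | ⟨r, f⟩ <;> rfl

lemma pvMin_assoc (a b c : Option (Int × String)) : pvMin (pvMin a b) c = pvMin a (pvMin b c) := by
  rcases a with _ | ⟨ar, af⟩ <;> rcases b with _ | ⟨br, bf⟩ <;> rcases c with _ | ⟨cr, cf⟩ <;>
    simp only [pvMin] <;> split_ifs <;> dsimp only <;> split_ifs <;> first | rfl | omega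

lemma pvStepB_eq_min (b : Option (Int × String)) (t : String) :
    pvStepB b t = pvMin b (pvStepB none t) := by
  simp only [pvStepB, pvMin]
  rcases h : pvRANK.get? t with _ | r <;> rcases b with _ | ⟨br, bf⟩ <;> simp

lemma foldl_stepB (tags : List String) (b : Option (Int × String)) :
    tags.foldl pvStepB b = pvMin b (tags.foldl pvStepB none) := by
  induction tags generalizing b with
  | nil => simp [pvMin]
  | cons t ts ih =>
    simp only [List.foldl_cons]
    rw [ih (pvStepB b t), ih (pvStepB none t), pvStepB_eq_min b t, pvMin_assoc]

-- characterization of B's fold: the first priority family present in the tags, with its rank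
lemma foldl_stepB_char (tags : List String) :
    tags.foldl pvStepB none =
      if "entry" ∈ tags then some (0, "entry")
      else if "bridge" ∈ tags then some (1, "bridge")
      else if "procedural" ∈ tags then some (2, "procedural")
      else if "friction" ∈ tags then some (3, "friction")
      else if "diagnostic" ∈ tags then some (4, "diagnostic")
      else if "transfer" ∈ tags then some (5, "transfer")
      else none := by
  induction tags with
  | nil => simp
  | cons t ts ih =>
    rw [List.foldl_cons, foldl_stepB ts (pvStepB none t), ih]
    by_cases h1 : "entry" = t
    · subst h1
      rw [(by decide : pvStepB none "entry" = some (0, "entry"))]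
      simp [List.mem_cons]
      split_ifs <;> simp [pvMin]
    by_cases h2 : "bridge" = t
    · subst h2
      rw [(by decide : pvStepB none "bridge" = some (1, "bridge"))]
      simp [List.mem_cons]
      split_ifs <;> simp [pvMin]
    by_cases h3 : "procedural" = t
    · subst h3
      rw [(by decide : pvStepB none "procedural" = some (2, "procedural"))]
      simp [List.mem_cons]
      split_ifs <;> simp [pvMin]
    by_cases h4 : "friction" = t
    · subst h4
      rw [(by decide : pvStepB none "friction" = some (3, "friction"))]
      simp [List.mem_cons]
      split_ifs <;> simp [pvMin]
    by_cases h5 : "diagnostic" = t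
    · subst h5
      rw [(by decide : pvStepB none "diagnostic" = some (4, "diagnostic"))]
      simp [List.mem_cons]
      split_ifs <;> simp [pvMin]
    by_cases h6 : "transfer" = t
    · subst h6
      rw [(by decide : pvStepB none "transfer" = some (5, "transfer"))]
      simp [List.mem_cons]
      split_ifs <;> simp [pvMin]
    · have hn : pvStepB none t = none := by
        simp [pvStepB, rank_char, h1, h2, h3, h4, h5, h6]
      rw [hn, pvMin_none_left]
      simp only [List.mem_cons]
      split_ifs <;> simp_all

lemma qmap_char (qt : String) : pvQUESTION_TYPE_MAP.get? qt =
    if "definition" = qt then some "definition" else if "purpose" = qt then some "purpose"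
    else if "orientation" = qt then some "purpose" else if "comparison" = qt then some "comparison"
    else if "procedure" = qt then some "procedure" else if "when_to_use" = qt then some "procedure"
    else if "misconception" = qt then some "misconception" else if "diagnostic" = qt then some "diagnostic"
    else if "interpretation" = qt then some "diagnostic" else if "transfer" = qt then some "application"
    else none := by
  rw [(by decide : pvQUESTION_TYPE_MAP = PySem.Dict.mk
    [("definition", "definition"), ("purpose", "purpose"), ("orientation", "purpose"),
     ("comparison", "comparison"), ("procedure", "procedure"), ("when_to_use", "procedure"),
     ("misconception", "misconception"), ("diagnostic", "diagnostic"),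
     ("interpretation", "diagnostic"), ("transfer", "application")])]
  simp only [PySem.Dict.get?, List.find?]
  split_ifs with h1 h2 h3 h4 h5 h6 h7 h8 h9 h10
  · subst h1; decide
  · subst h2; decide
  · subst h3; decide
  · subst h4; decide
  · subst h5; decide
  · subst h6; decide
  · subst h7; decide
  · subst h8; decide
  · subst h9; decide
  · subst h10; decide
  · rw [beq_eq_false_iff_ne.mpr h1, beq_eq_false_iff_ne.mpr h2, beq_eq_false_iff_ne.mpr h3,
       beq_eq_false_iff_ne.mpr h4, beq_eq_false_iff_ne.mpr h5, beq_eq_false_iff_ne.mpr h6,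
       beq_eq_false_iff_ne.mpr h7, beq_eq_false_iff_ne.mpr h8, beq_eq_false_iff_ne.mpr h9,
       beq_eq_false_iff_ne.mpr h10]
    rfl

lemma tfam_char (qt : String) : pvTYPE_FAMILY.get? qt =
    if "definition" = qt then some "entry" else if "purpose" = qt then some "entry"
    else if "orientation" = qt then some "entry" else if "comparison" = qt then some "bridge"
    else if "procedure" = qt then some "procedural" else if "when_to_use" = qt then some "procedural"
    else if "misconception" = qt then some "friction" else if "diagnostic" = qt then some "diagnostic"
    else if "interpretation" = qt then some "diagnostic" else if "transfer" = qt then some "transfer"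
    else none := by
  rw [(by decide : pvTYPE_FAMILY = PySem.Dict.mk
    [("definition", "entry"), ("purpose", "entry"), ("orientation", "entry"),
     ("comparison", "bridge"), ("procedure", "procedural"), ("when_to_use", "procedural"),
     ("misconception", "friction"), ("diagnostic", "diagnostic"),
     ("interpretation", "diagnostic"), ("transfer", "transfer")])]
  simp only [PySem.Dict.get?, List.find?]
  split_ifs with h1 h2 h3 h4 h5 h6 h7 h8 h9 h10
  · subst h1; decide
  · subst h2; decide
  · subst h3; decide
  · subst h4; decide
  · subst h5; decide
  · subst h6; decide
  · subst h7; decide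
  · subst h8; decide
  · subst h9; decide
  · subst h10; decide
  · rw [beq_eq_false_iff_ne.mpr h1, beq_eq_false_iff_ne.mpr h2, beq_eq_false_iff_ne.mpr h3,
       beq_eq_false_iff_ne.mpr h4, beq_eq_false_iff_ne.mpr h5, beq_eq_false_iff_ne.mpr h6,
       beq_eq_false_iff_ne.mpr h7, beq_eq_false_iff_ne.mpr h8, beq_eq_false_iff_ne.mpr h9,
       beq_eq_false_iff_ne.mpr h10]
    rfl

-- the two fallbacks (A's normalize + if/elif chain, B's direct dict) agree on every string
lemma fallback_eq (qt : String) :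
    (let mapped := normalize_question_type qt
     if mapped = "definition" ∨ mapped = "purpose" then "entry"
     else if mapped = "comparison" then "bridge"
     else if mapped = "procedure" then "procedural"
     else if mapped = "misconception" then "friction"
     else if mapped = "diagnostic" then "diagnostic"
     else "transfer") = pvTYPE_FAMILY.getD qt "transfer" := by
  by_cases h1 : "definition" = qt
  · subst h1; decide
  by_cases h2 : "purpose" = qt
  · subst h2; decide
  by_cases h3 : "orientation" = qt
  · subst h3; decide
  by_cases h4 : "comparison" = qt
  · subst h4; decide
  by_cases h5 : "procedure" = qt
  · subst h5; decide
  by_cases h6 : "when_to_use" = qt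
  · subst h6; decide
  by_cases h7 : "misconception" = qt
  · subst h7; decide
  by_cases h8 : "diagnostic" = qt
  · subst h8; decide
  by_cases h9 : "interpretation" = qt
  · subst h9; decide
  by_cases h10 : "transfer" = qt
  · subst h10; decide
  · simp only [normalize_question_type, PySem.Dict.getD_eq_get?_getD, qmap_char, tfam_char,
      if_neg h1, if_neg h2, if_neg h3, if_neg h4, if_neg h5, if_neg h6, if_neg h7, if_neg h8,
      if_neg h9, if_neg h10]
    decide

-- ===== VERDICT (by name: the statement is the Claim_ definition above) =====
theorem select_question_family_spec : Claim_equal_select_question_family := by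
  intro tags qt _
  unfold Spec_select_question_family select_question_family select_question_family_alt
  rw [foldl_stepB_char]
  cases tags with
  | nil => simpa using fallback_eq qt
  | cons t ts =>
    simp only [List.isEmpty_cons]
    simp only [pvScanA, pvFAMILY_PRIORITY]
    by_cases h1 : "entry" ∈ t :: ts <;> by_cases h2 : "bridge" ∈ t :: ts <;>
      by_cases h3 : "procedural" ∈ t :: ts <;> by_cases h4 : "friction" ∈ t :: ts <;>
      by_cases h5 : "diagnostic" ∈ t :: ts <;> by_cases h6 : "transfer" ∈ t :: ts <;>
      simp_all
    · exact fallback_eq qt
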